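-- pv_equiv track=rewrite | github.com/ashalabi/Coding-Problems | Duplicate.py | duplicate3
-- ===== SOURCE A (Python) =====
-- def duplicate3(array):
--     dup = set()
--     nDup = set()
--     for i in array:
--         if i in nDup:
--             dup.add(i)
--         else:
--             nDup.add(i)
--     return nDup, dup
-- ===== SOURCE B (Python) =====
-- def duplicate3(array):
--     nDup = set(array)
--     dup = {x for k, x in enumerate(array) if x in array[:k]}
--     return nDup, dup
-- ===== Notes on version B (the rewrite author's own statement) =====
-- stated objective: alternative
-- what changed: Replaces A's single pass with two running sets by a stateless staged decomposition: nDup is set(array) directly, and dup is a comprehension keeping each element whose strict prefix array[:k] already contains it (brute-force prefix membership, no maintained seen-set).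
import Mathlib
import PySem

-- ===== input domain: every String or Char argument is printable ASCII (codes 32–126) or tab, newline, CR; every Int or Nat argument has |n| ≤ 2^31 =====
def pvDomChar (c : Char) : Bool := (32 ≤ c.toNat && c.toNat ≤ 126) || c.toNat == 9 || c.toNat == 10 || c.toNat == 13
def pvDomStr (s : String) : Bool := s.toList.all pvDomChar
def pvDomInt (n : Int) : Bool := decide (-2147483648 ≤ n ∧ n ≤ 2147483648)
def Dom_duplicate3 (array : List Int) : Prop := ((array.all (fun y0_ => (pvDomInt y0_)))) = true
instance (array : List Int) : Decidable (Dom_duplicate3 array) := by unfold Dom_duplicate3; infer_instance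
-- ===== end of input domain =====

-- B replaces A's single pass with two running sets by a stateless staged decomposition (set(array), plus a prefix-membership comprehension for dup); same return value, different algorithm of higher cost.


-- ===== PORT A =====
-- literal port of A: one pass, two running sets; `dup.add(i)` when i already in nDup
def duplicate3 (array : List Int) : List Int × List Int :=
  let st := array.foldl
    (fun (st : PySem.Set Int × PySem.Set Int) i =>
      if PySem.Set.contains st.2 i then (PySem.Set.add st.1 i, st.2)
      else (st.1, PySem.Set.add st.2 i))
    (PySem.Set.empty, PySem.Set.empty)
  (st.2, st.1)

-- ===== PORT B =====
-- literal port of B: nDup = set(array); dup = {x for k, x in enumerate(array) if x in array[:k]}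
def duplicate3_alt (array : List Int) : List Int × List Int :=
  (PySem.Set.ofList array,
   PySem.Set.ofList
     (((PySem.List.enumerate array 0).filter
        (fun p => (PySem.List.slice array none (some p.1)).contains p.2)).map (·.2)))

-- ===== PRECONDITION & SPEC =====
def Spec_duplicate3 (array : List Int) (out : List Int × List Int) : Prop := out = duplicate3_alt array
instance (array : List Int) (out : List Int × List Int) : Decidable (Spec_duplicate3 array out) := by unfold Spec_duplicate3; infer_instance

-- ===== CLAIM (what is proved, stated in full; the proofs are below) =====
def Claim_equal_duplicate3 : Prop := ∀ (array : List Int), Dom_duplicate3 array → Spec_duplicate3 array (duplicate3 array)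

-- ===== LEMMAS AND PROOFS =====

/-- The elements of `xs` that are preceded by an earlier occurrence (B's dup comprehension body). -/
def seconds (xs : List Int) : List Int :=
  ((PySem.List.enumerate xs 0).filter
    (fun p => (PySem.List.slice xs none (some p.1)).contains p.2)).map (·.2)

/-- Appending one element extends `seconds` by `[i]` exactly when `i` already occurs. -/
theorem seconds_append_singleton (pre : List Int) (i : Int) :
    seconds (pre ++ [i]) = seconds pre ++ (if i ∈ pre then [i] else []) := by
  unfold seconds
  rw [PySem.List.enumerate_append, List.filter_append, List.map_append]
  congr 1
  · -- indices below pre.length: slicing pre ++ [i] is slicing pre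
    congr 1
    apply List.filter_congr
    intro p hp
    rcases (PySem.List.mem_enumerate_iff _ _ _).mp hp with ⟨k, hk, rfl⟩
    simp only [Int.zero_add]
    rw [PySem.List.slice_to_natCast, PySem.List.slice_to_natCast,
        List.take_append_of_le_length (le_of_lt hk)]
  · -- the new index pre.length: slice is all of pre
    simp only [PySem.List.enumerate_cons, PySem.List.enumerate_nil, Int.zero_add]
    rw [List.filter_cons]
    have hsl : PySem.List.slice (pre ++ [i]) none (some ((pre.length : Int))) = pre := by
      rw [PySem.List.slice_to_natCast, List.take_append_of_le_length (le_refl _), List.take_length]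
    by_cases hmem : i ∈ pre
    · simp [hsl, hmem]
    · simp [hsl, hmem]

/-- Loop invariant: after processing `pre`, A's state is `(ofList (seconds pre), ofList pre)`
    (dup, nDup); running the loop over the rest `l` lands at `pre ++ l`. -/
theorem duplicate3_loop (l : List Int) :
    ∀ (pre : List Int),
    (l.foldl
      (fun (st : PySem.Set Int × PySem.Set Int) i =>
        if PySem.Set.contains st.2 i then (PySem.Set.add st.1 i, st.2)
        else (st.1, PySem.Set.add st.2 i))
      (PySem.Set.ofList (seconds pre), PySem.Set.ofList pre))
    = (PySem.Set.ofList (seconds (pre ++ l)), PySem.Set.ofList (pre ++ l)) := by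
  induction l with
  | nil => intro pre; simp
  | cons i t ih =>
    intro pre
    simp only [List.foldl_cons]
    have hstep :
        (if PySem.Set.contains (PySem.Set.ofList pre) i
         then (PySem.Set.add (PySem.Set.ofList (seconds pre)) i, PySem.Set.ofList pre)
         else (PySem.Set.ofList (seconds pre), PySem.Set.add (PySem.Set.ofList pre) i))
        = (PySem.Set.ofList (seconds (pre ++ [i])), PySem.Set.ofList (pre ++ [i])) := by
      rw [seconds_append_singleton, PySem.Set.ofList_append_singleton]
      by_cases hmem : i ∈ pre
      · have hc : PySem.Set.contains (PySem.Set.ofList pre) i = true :=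
          (PySem.Set.contains_iff _ _).mpr ((PySem.Set.mem_ofList _ _).mpr hmem)
        have hadd : PySem.Set.add (PySem.Set.ofList pre) i = PySem.Set.ofList pre := by
          unfold PySem.Set.add; simp [hc, hmem]
        rw [if_pos hc, if_pos hmem, PySem.Set.ofList_append_singleton, hadd]
      · have hc : ¬ (PySem.Set.contains (PySem.Set.ofList pre) i = true) := fun h =>
          hmem ((PySem.Set.mem_ofList _ _).mp ((PySem.Set.contains_iff _ _).mp h))
        rw [if_neg hc, if_neg hmem, List.append_nil]
    rw [hstep, ih (pre ++ [i]), List.append_assoc]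
    rfl

-- ===== VERDICT (by name: the statement is the Claim_ definition above) =====
theorem duplicate3_spec : Claim_equal_duplicate3 := by
  intro array _
  unfold Spec_duplicate3 duplicate3 duplicate3_alt
  have h := duplicate3_loop array []
  simp only [seconds] at h
  simpa [PySem.Set.empty, seconds] using congrArg (fun st => (st.2, st.1)) h
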